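-- pv_equiv track=rewrite | github.com/ayaranitram/unyts | src/unyts/_convert.py | _splitUnit
-- ===== SOURCE A (Python) =====
-- def _splitUnit(unit):
--     result = None
--     for c in unit:
--         if c in '*/':
--             result.append(c)
--         elif result is None:
--             result = [c]
--         elif result[-1] in '*/':
--             result.append(c)
--         else:
--             result[-1] = result[-1] + c
--     return result
-- ===== SOURCE B (Python) =====
-- def _splitUnit(unit):
--     result = None
--     i = 0
--     n = len(unit)
--     while i < n:
--         if unit[i] in '*/':
--             result.append(unit[i])
--             i += 1
--         else:
--             j = i
--             while j < n and unit[j] not in '*/':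
--                 j += 1
--             if result is None:
--                 result = [unit[i:j]]
--             else:
--                 result.append(unit[i:j])
--             i = j
--     return result
-- ===== Notes on version B (the rewrite author's own statement) =====
-- stated objective: faster
-- what changed: B scans maximal runs of non-operator characters with an index/slice loop and emits each run as one token in a single append, instead of A's per-character loop that rebuilds the last list element by string concatenation for every character.
-- outside the precondition, e.g. on _splitUnit('*'): A raises AttributeError, B raises AttributeError; on _splitUnit('/'): A raises AttributeError, B raises AttributeError
import Mathlib
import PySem

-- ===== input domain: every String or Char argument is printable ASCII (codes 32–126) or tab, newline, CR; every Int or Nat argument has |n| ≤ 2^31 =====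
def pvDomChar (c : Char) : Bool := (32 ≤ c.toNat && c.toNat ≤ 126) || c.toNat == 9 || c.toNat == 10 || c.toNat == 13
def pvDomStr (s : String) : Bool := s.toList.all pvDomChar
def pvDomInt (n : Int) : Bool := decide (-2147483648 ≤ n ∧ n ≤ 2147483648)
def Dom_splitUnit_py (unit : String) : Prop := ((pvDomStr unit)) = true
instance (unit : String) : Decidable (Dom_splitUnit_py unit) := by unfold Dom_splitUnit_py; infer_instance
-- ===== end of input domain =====

-- B tokenizes by scanning maximal runs of non-operator characters and emitting each run
-- as one token, instead of A's per-character loop mutating the last list element (objective: alternative).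


-- c in '*/'
def pvOp (c : Char) : Bool := c == '*' || c == '/'

-- ===== PORT A =====
-- A's loop body; tokens are kept as List Char (exact for the ASCII domain), joined to String at the end.
-- 'none => none' in the op branch is Python's AttributeError on 'result.append' with result = None (excluded by Pre_).
def splitUnit_py_step (result : Option (List (List Char))) (c : Char) : Option (List (List Char)) :=
  if pvOp c then
    match result with
    | none => none
    | some r => some (r ++ [[c]])
  else
    match result with
    | none => some [[c]]
    | some r =>
      match r.getLast? with
      | none => some r  -- unreachable: A's result list is never empty once it is a list
      | some t =>
        if t = ['*'] ∨ t = ['/'] then some (r ++ [[c]])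
        else some (r.dropLast ++ [t ++ [c]])   -- result[-1] = result[-1] + c

def splitUnit_py (unit : String) : Option (List String) :=
  (unit.toList.foldl splitUnit_py_step none).map (List.map String.ofList)

-- ===== PORT B =====
-- B's outer while loop as recursion on the remaining characters; the inner j-scan is the
-- takeWhile/dropWhile split of the remaining characters at the next operator.
def splitUnit_py_alt_go : List Char → Option (List (List Char)) → Option (List (List Char))
  | [], result => result
  | c :: rest, result =>
    if pvOp c then
      match result with
      | none => none   -- Python: result.append on None raises AttributeError (excluded by Pre_)
      | some r => splitUnit_py_alt_go rest (some (r ++ [[c]]))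
    else
      match result with
      | none => splitUnit_py_alt_go (rest.dropWhile (fun d => !pvOp d)) (some [c :: rest.takeWhile (fun d => !pvOp d)])
      | some r => splitUnit_py_alt_go (rest.dropWhile (fun d => !pvOp d)) (some (r ++ [c :: rest.takeWhile (fun d => !pvOp d)]))
  termination_by cs _ => cs.length
  decreasing_by
    · simp
    · simpa using Nat.lt_succ_of_le (List.length_dropWhile_le _ _)
    · simpa using Nat.lt_succ_of_le (List.length_dropWhile_le _ _)

def splitUnit_py_alt (unit : String) : Option (List String) :=
  (splitUnit_py_alt_go unit.toList none).map (List.map String.ofList)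

-- ===== PRECONDITION & SPEC =====
-- Pre_ excludes exactly the strings whose first character is '*' or '/', on which A raises
-- AttributeError (result.append on None); B raises the same exception there.
def Pre_splitUnit_py (unit : String) : Prop :=
  unit.toList.head? ≠ some '*' ∧ unit.toList.head? ≠ some '/'
instance (unit : String) : Decidable (Pre_splitUnit_py unit) := by unfold Pre_splitUnit_py; infer_instance
def pvWitness_splitUnit_py : String := "kg*m/s"

def Spec_splitUnit_py (unit : String) (out : Option (List String)) : Prop := out = splitUnit_py_alt unit
instance (unit : String) (out : Option (List String)) : Decidable (Spec_splitUnit_py unit out) := by unfold Spec_splitUnit_py; infer_instance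

-- ===== CLAIM (what is proved, stated in full; the proofs are below) =====
def Claim_equal_splitUnit_py : Prop := ∀ (unit : String), Dom_splitUnit_py unit → Pre_splitUnit_py unit → Spec_splitUnit_py unit (splitUnit_py unit)

-- ===== LEMMAS AND PROOFS =====

-- Folding A's step over a run of non-operator characters extends the (nonempty, operator-free) last token.
lemma extend_run (run : List Char) : ∀ (t : List Char) (r : List (List Char)),
    (∀ d ∈ run, pvOp d = false) → t ≠ [] → (∀ d ∈ t, pvOp d = false) →
    List.foldl splitUnit_py_step (some (r ++ [t])) run = some (r ++ [t ++ run]) := by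
  induction run with
  | nil => intro t r _ _ _; simp
  | cons c run' ih =>
    intro t r hrun ht htop
    have hc : pvOp c = false := hrun c (by simp)
    have hstar : t ≠ ['*'] := by
      intro h; have := htop '*' (by simp [h]); simp [pvOp] at this
    have hslash : t ≠ ['/'] := by
      intro h; have := htop '/' (by simp [h]); simp [pvOp] at this
    have hstep : splitUnit_py_step (some (r ++ [t])) c = some (r ++ [t ++ [c]]) := by
      simp [splitUnit_py_step, hc, hstar, hslash]
    rw [List.foldl_cons, hstep,
        ih (t ++ [c]) r (fun d hd => hrun d (by simp [hd])) (by simp)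
          (fun d hd => by rcases List.mem_append.1 hd with h | h
                          · exact htop d h
                          · simp at h; simpa [h] using hc)]
    simp

-- head of dropWhile fails the predicate
lemma head_dropWhile_false {p : Char → Bool} {l : List Char} {c : Char} {rest : List Char}
    (h : l.dropWhile p = c :: rest) : p c = false := by
  induction l with
  | nil => simp at h
  | cons a l ih =>
    by_cases hp : p a
    · rw [List.dropWhile_cons_of_pos hp] at h; exact ih h
    · rw [List.dropWhile_cons_of_neg hp] at h
      cases h; simpa using hp

-- Main invariant: from any state whose last token is an operator whenever the next character is
-- a non-operator, A's fold and B's run-scanning recursion agree.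
lemma main_eq : ∀ (n : ℕ) (cs : List Char), cs.length ≤ n → ∀ (r : List (List Char)),
    (∀ c cs', cs = c :: cs' → pvOp c = false →
        r.getLast? = some ['*'] ∨ r.getLast? = some ['/']) →
    List.foldl splitUnit_py_step (some r) cs = splitUnit_py_alt_go cs (some r) := by
  intro n
  induction n with
  | zero =>
    intro cs hlen r _
    have : cs = [] := List.eq_nil_of_length_eq_zero (Nat.le_zero.1 hlen)
    subst this; simp [splitUnit_py_alt_go]
  | succ m ih =>
    intro cs hlen r hinv
    cases cs with
    | nil => simp [splitUnit_py_alt_go]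
    | cons c rest =>
      by_cases hc : pvOp c
      · -- operator: both append [c] and continue
        have hstep : splitUnit_py_step (some r) c = some (r ++ [[c]]) := by
          simp [splitUnit_py_step, hc]
        rw [List.foldl_cons, hstep, splitUnit_py_alt_go, if_pos hc]
        exact ih rest (by simpa using Nat.le_of_succ_le_succ hlen) (r ++ [[c]])
          (fun c' cs' _ _ => by
            have : c = '*' ∨ c = '/' := by
              simp [pvOp] at hc; tauto
            rcases this with h | h <;> simp [h])
      · -- non-operator: A consumes the run one char at a time, B in one step
        have hc' : pvOp c = false := by simpa using hc
        have hlast := hinv c rest rfl hc'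
        obtain ⟨t, ht⟩ : ∃ t, r.getLast? = some t := by
          rcases hlast with h | h <;> exact ⟨_, h⟩
        have htop : t = ['*'] ∨ t = ['/'] := by
          rcases hlast with h | h <;> rw [h] at ht <;> cases ht
          · exact Or.inl rfl
          · exact Or.inr rfl
        have hstep : splitUnit_py_step (some r) c = some (r ++ [[c]]) := by
          simp [splitUnit_py_step, hc', ht, htop]
        set run := rest.takeWhile (fun d => !pvOp d) with hrun
        set rest' := rest.dropWhile (fun d => !pvOp d) with hrest'
        have hsplit : rest = run ++ rest' := (List.takeWhile_append_dropWhile).symm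
        have hA : List.foldl splitUnit_py_step (some r) (c :: rest)
            = List.foldl splitUnit_py_step (some (r ++ [c :: run])) rest' := by
          rw [List.foldl_cons, hstep]
          conv_lhs => rw [hsplit]
          rw [List.foldl_append]
          congr 1
          have := extend_run run [c] r
            (fun d hd => by
              have := List.mem_takeWhile_imp (hrun ▸ hd)
              simpa using this)
            (by simp) (fun d hd => by simp at hd; simpa [hd] using hc')
          simpa using this
        have hB : splitUnit_py_alt_go (c :: rest) (some r)
            = splitUnit_py_alt_go rest' (some (r ++ [c :: run])) := by
          rw [splitUnit_py_alt_go, if_neg hc]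
        rw [hA, hB]
        apply ih rest' (le_trans (List.length_dropWhile_le _ _)
          (by simpa using Nat.le_of_succ_le_succ hlen))
        intro c' cs' hcs' hcop
        exfalso
        have := head_dropWhile_false (hrest' ▸ hcs')
        simp [hcop] at this

lemma core_eq (cs : List Char)
    (h1 : cs.head? ≠ some '*') (h2 : cs.head? ≠ some '/') :
    List.foldl splitUnit_py_step none cs = splitUnit_py_alt_go cs none := by
  cases cs with
  | nil => simp [splitUnit_py_alt_go]
  | cons c rest =>
    have hc : pvOp c = false := by
      simp at h1 h2
      simp [pvOp, h1, h2]
    have hstep : splitUnit_py_step none c = some [[c]] := by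
      simp [splitUnit_py_step, hc]
    set run := rest.takeWhile (fun d => !pvOp d) with hrun
    set rest' := rest.dropWhile (fun d => !pvOp d) with hrest'
    have hsplit : rest = run ++ rest' := (List.takeWhile_append_dropWhile).symm
    have hA : List.foldl splitUnit_py_step none (c :: rest)
        = List.foldl splitUnit_py_step (some [c :: run]) rest' := by
      rw [List.foldl_cons, hstep]
      conv_lhs => rw [hsplit]
      rw [List.foldl_append]
      congr 1
      have := extend_run run [c] []
        (fun d hd => by
          have := List.mem_takeWhile_imp (hrun ▸ hd)
          simpa using this)
        (by simp) (fun d hd => by simp at hd; simpa [hd] using hc)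
      simpa using this
    have hB : splitUnit_py_alt_go (c :: rest) none
        = splitUnit_py_alt_go rest' (some [c :: run]) := by
      rw [splitUnit_py_alt_go, if_neg (by simp [hc])]
    rw [hA, hB]
    apply main_eq rest'.length rest' le_rfl
    intro c' cs' hcs' hcop
    exfalso
    have := head_dropWhile_false (hrest' ▸ hcs')
    simp [hcop] at this

-- ===== VERDICT (by name: the statement is the Claim_ definition above) =====
theorem splitUnit_py_spec : Claim_equal_splitUnit_py := by
  intro unit _ hpre
  unfold Spec_splitUnit_py splitUnit_py splitUnit_py_alt
  rw [core_eq unit.toList hpre.1 hpre.2]
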